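-- pv_equiv track=rewrite | github.com/waynewu6250/ML_DL_Projects | 3.Movie-bot-keras/test.py | separate_conv
-- ===== SOURCE A (Python) =====
-- def separate_conv(ids, toks):
--     """
--     Separate the sequence of characters and their words if they utter continuously without waiting for the other to speak
--     For example:
--     ids = [2, 0, 2, 0, 2, 0, 0 ,2]
--     toks = [tok1, tok2, tok3, tok4, tok5, tok6, tok7, tok8]
--     sep_toks = [[tok1, tok2, tok3, tok4, tok5, tok6], [tok7, tok8]]
--
--     """
--     sep_toks = []
--     for i in range(len(ids)):
--         if i == 0:
--             temp = ids[i]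
--             idx = i
--         else:
--             if temp == ids[i]:
--                 sep_toks.append(toks[idx:i])
--                 idx = i
--             temp = ids[i]
--
--         if i == (len(ids)-1):
--             sep_toks.append(toks[idx:len(ids)])
--
--     return sep_toks
-- ===== SOURCE B (Python) =====
-- def separate_conv(ids, toks):
--     # Backward single pass: walk the indices from the end, growing the current
--     # segment token by token (kept in reverse) and closing it whenever the
--     # speaker at i equals the speaker at i-1; segments are collected last-first
--     # and reversed once at the end.  No slicing by boundary indices.
--     n = len(ids)
--     if n == 0:
--         return []
--     rev_segs = []
--     cur = []  # current segment, tokens in reverse order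
--     for i in range(n - 1, -1, -1):
--         cur = cur + toks[i:i+1]
--         if i > 0 and ids[i] == ids[i-1]:
--             rev_segs.append(cur[::-1])
--             cur = []
--     rev_segs.append(cur[::-1])
--     rev_segs.reverse()
--     return rev_segs
-- ===== Notes on version B (the rewrite author's own statement) =====
-- stated objective: alternative
-- what changed: A scans forward keeping a segment-start index and emits segments as slices toks[idx:i]; B traverses the indices backward, growing the current segment token by token in a reversed accumulator, closing it when ids[i]==ids[i-1], and reverses the collected segments once at the end - no boundary-index slicing of segments at all.
import Mathlib
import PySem

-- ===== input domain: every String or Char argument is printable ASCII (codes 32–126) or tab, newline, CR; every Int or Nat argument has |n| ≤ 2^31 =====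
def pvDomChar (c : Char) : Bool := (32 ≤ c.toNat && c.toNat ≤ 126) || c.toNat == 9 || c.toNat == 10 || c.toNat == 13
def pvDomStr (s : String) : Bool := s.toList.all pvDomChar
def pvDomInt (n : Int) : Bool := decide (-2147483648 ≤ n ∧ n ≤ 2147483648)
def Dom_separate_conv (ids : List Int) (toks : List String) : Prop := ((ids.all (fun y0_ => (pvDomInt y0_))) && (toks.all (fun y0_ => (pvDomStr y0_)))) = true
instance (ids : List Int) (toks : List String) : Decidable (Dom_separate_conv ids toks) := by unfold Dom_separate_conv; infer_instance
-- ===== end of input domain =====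

-- B replaces A's forward scan with slicing at a tracked segment start by a BACKWARD
-- single pass that grows the current segment token by token in a reversed accumulator
-- and reverses the collected segments once at the end; same return value ("alternative").

-- ===== PORT A =====
-- loop body of A's for-loop; state is (sep_toks, temp, idx).
-- ids[i] is ported as pyGetD with default 0: every i drawn from range(len(ids)) is in
-- range, so the default is never used and the port is exact.
def sepStepA (ids : List Int) (toks : List String) (n : Int)
    (st : List (List String) × Int × Int) (i : Int) : List (List String) × Int × Int :=
  let sep := st.1
  let temp := st.2.1
  let idx := st.2.2
  let st2 : List (List String) × Int × Int :=
    if i = 0 then (sep, PySem.List.pyGetD ids i 0, i)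
    else if temp = PySem.List.pyGetD ids i 0 then
      (sep ++ [PySem.List.slice toks (some idx) (some i)], PySem.List.pyGetD ids i 0, i)
    else (sep, PySem.List.pyGetD ids i 0, idx)
  if i = n - 1 then
    (st2.1 ++ [PySem.List.slice toks (some st2.2.2) (some n)], st2.2.1, st2.2.2)
  else st2

def separate_conv (ids : List Int) (toks : List String) : List (List String) :=
  ((PySem.List.pyRange 0 (ids.length : Int) 1).foldl
    (sepStepA ids toks (ids.length : Int)) ([], 0, 0)).1

-- ===== PORT B =====
-- loop body of B's backward for-loop; state is (rev_segs, cur); cur holds the current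
-- segment's tokens in reverse; ids[i], ids[i-1] are in range whenever read (0 < i).
def sepStepB (ids : List Int) (toks : List String)
    (st : List (List String) × List String) (i : Int) : List (List String) × List String :=
  let cur := st.2 ++ PySem.List.slice toks (some i) (some (i + 1))
  if 0 < i ∧ PySem.List.pyGetD ids i 0 = PySem.List.pyGetD ids (i - 1) 0 then
    (st.1 ++ [cur.reverse], [])
  else (st.1, cur)

def separate_conv_alt (ids : List Int) (toks : List String) : List (List String) :=
  if ids = [] then []
  else
    let st := (PySem.List.pyRange ((ids.length : Int) - 1) (-1) (-1)).foldl
      (sepStepB ids toks) ([], [])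
    (st.1 ++ [st.2.reverse]).reverse

-- ===== PRECONDITION & SPEC =====
def Spec_separate_conv (ids : List Int) (toks : List String) (out : List (List String)) : Prop := out = separate_conv_alt ids toks
instance (ids : List Int) (toks : List String) (out : List (List String)) : Decidable (Spec_separate_conv ids toks out) := by unfold Spec_separate_conv; infer_instance

-- ===== CLAIM (what is proved, stated in full; the proofs are below) =====
def Claim_equal_separate_conv : Prop := ∀ (ids : List Int) (toks : List String), Dom_separate_conv ids toks → Spec_separate_conv ids toks (separate_conv ids toks)

-- ===== LEMMAS AND PROOFS =====

-- proof-side normal form: slices of toks between consecutive members of a bounds list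
def sepSegs (toks : List String) (bounds : List Int) : List (List String) :=
  (bounds.zip bounds.tail).map (fun p => PySem.List.slice toks (some p.1) (some p.2))

-- proof-side: the cut indices in [1, k] (where the same speaker continues)
def cutsUpto (ids : List Int) (k : Int) : List Int :=
  (PySem.List.pyRange 1 (k + 1) 1).filter
    (fun i => PySem.List.pyGetD ids i 0 == PySem.List.pyGetD ids (i - 1) 0)

theorem sepSegs_cons (toks : List String) (a b : Int) (rest : List Int) :
    sepSegs toks (a :: b :: rest)
      = PySem.List.slice toks (some a) (some b) :: sepSegs toks (b :: rest) := by
  simp [sepSegs]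

theorem sepSegs_snoc (toks : List String) (c : Int) (rest : List Int) (x : Int) :
    sepSegs toks ((c :: rest) ++ [x])
      = sepSegs toks (c :: rest)
        ++ [PySem.List.slice toks (some ((c :: rest).getLastD 0)) (some x)] := by
  induction rest generalizing c with
  | nil => simp [sepSegs]
  | cons d rest ih =>
      rw [show (c :: d :: rest) ++ [x] = c :: d :: (rest ++ [x]) from rfl,
        sepSegs_cons toks c d (rest ++ [x]),
        show d :: (rest ++ [x]) = (d :: rest) ++ [x] from rfl, ih d,
        sepSegs_cons toks c d rest]
      simp

theorem slice_split (xs : List String) (a b c : Int)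
    (ha : 0 ≤ a) (hab : a ≤ b) (hbc : b ≤ c) :
    PySem.List.slice xs (some a) (some c)
      = PySem.List.slice xs (some a) (some b) ++ PySem.List.slice xs (some b) (some c) := by
  rw [PySem.List.slice_toNat xs ha (by omega), PySem.List.slice_toNat xs ha (by omega),
    PySem.List.slice_toNat xs (by omega : (0:Int) ≤ b) (by omega)]
  have h1 : c.toNat - a.toNat = (b.toNat - a.toNat) + (c.toNat - b.toNat) := by omega
  rw [h1, List.take_add]
  have h3 : a.toNat + (b.toNat - a.toNat) = b.toNat := by omega
  simp [List.drop_drop, h3]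

theorem slice_one_reverse (xs : List String) (a : Int) (ha : 0 ≤ a) :
    (PySem.List.slice xs (some a) (some (a + 1))).reverse
      = PySem.List.slice xs (some a) (some (a + 1)) := by
  rw [PySem.List.slice_toNat xs ha (by omega)]
  have h1 : (a + 1).toNat - a.toNat = 1 := by omega
  rw [h1]
  cases xs.drop a.toNat with
  | nil => simp
  | cons y ys => simp

theorem getLastD_mem (c : Int) (rest : List Int) : (c :: rest).getLastD 0 ∈ c :: rest := by
  rw [List.getLastD_eq_getLast?, List.getLast?_eq_some_getLast (by simp), Option.getD_some]
  exact List.getLast_mem _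

theorem mem_cutsUpto (ids : List Int) (k x : Int) (hx : x ∈ cutsUpto ids k) :
    1 ≤ x ∧ x < k + 1 := by
  unfold cutsUpto at hx
  have := List.mem_filter.mp hx
  exact (PySem.List.mem_pyRange_one).mp this.1

theorem cutsUpto_neg (ids : List Int) (k : Int) (hk : k ≤ 0) : cutsUpto ids k = [] := by
  unfold cutsUpto
  rw [PySem.List.pyRange_one_eq_nil (by omega)]
  rfl

theorem cutsUpto_succ (ids : List Int) (k : Int) (hk : 1 ≤ k) :
    cutsUpto ids k
      = cutsUpto ids (k - 1)
        ++ (if PySem.List.pyGetD ids k 0 == PySem.List.pyGetD ids (k - 1) 0 then [k] else []) := by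
  unfold cutsUpto
  rw [show k - 1 + 1 = k by omega, PySem.List.pyRange_one_succ_right hk, List.filter_append]
  congr 1
  simp [List.filter_cons]

-- the backward-loop invariant: folding B's step over indices k, k-1, …, 0 from state
-- (segs, cur) yields the closed segments for the cuts in [1, k] (last-first) and the
-- still-open head segment, all in reversed-accumulator form.
theorem sepLoopB_inv (ids : List Int) (toks : List String) (m : Nat) :
    ∀ (k : Int) (segs : List (List String)) (cur : List String),
      (k + 1).toNat = m → -1 ≤ k →
      (PySem.List.pyRange k (-1) (-1)).foldl (sepStepB ids toks) (segs, cur)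
        = (if cutsUpto ids k = [] then
            (segs, cur ++ (PySem.List.slice toks (some 0) (some (k + 1))).reverse)
           else
            (segs
              ++ [PySem.List.slice toks (some ((cutsUpto ids k).getLastD 0)) (some (k + 1))
                    ++ cur.reverse]
              ++ (sepSegs toks (cutsUpto ids k)).reverse,
             (PySem.List.slice toks (some 0) (some ((cutsUpto ids k).headD 0))).reverse)) := by
  induction m with
  | zero =>
      intro k segs cur hm hk
      have hk1 : k = -1 := by omega
      subst hk1
      rw [PySem.List.pyRange_neg_one_eq_nil (by omega), List.foldl_nil,
        if_pos (cutsUpto_neg ids (-1) (by omega))]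
      simp [PySem.List.slice_to]
  | succ m ih =>
      intro k segs cur hm hk
      have hk0 : 0 ≤ k := by omega
      rw [PySem.List.pyRange_neg_one_cons (by omega : (-1:Int) < k), List.foldl_cons]
      by_cases hp : 0 < k ∧ PySem.List.pyGetD ids k 0 = PySem.List.pyGetD ids (k - 1) 0
      · -- cut at k: the current segment is closed
        have hstep : sepStepB ids toks (segs, cur) k
            = (segs ++ [(cur ++ PySem.List.slice toks (some k) (some (k + 1))).reverse], []) := by
          simp [sepStepB, hp]
        rw [hstep, ih (k - 1) _ [] (by omega) (by omega)]
        have hcuts : cutsUpto ids k = cutsUpto ids (k - 1) ++ [k] := by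
          rw [cutsUpto_succ ids k (by omega), if_pos (beq_iff_eq.mpr hp.2)]
        have hlast2 : ∀ (c : Int) (rest : List Int), ((c :: rest) ++ [k]).getLastD 0 = k := by
          intro c rest
          rw [List.getLastD_eq_getLast?, List.getLast?_concat, Option.getD_some]
        have hrev : (cur ++ PySem.List.slice toks (some k) (some (k + 1))).reverse
            = PySem.List.slice toks (some k) (some (k + 1)) ++ cur.reverse := by
          rw [List.reverse_append, slice_one_reverse toks k hk0]
        by_cases hce : cutsUpto ids (k - 1) = []
        · rw [if_pos hce, hcuts, hce]
          rw [if_neg (by simp)]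
          simp [sepSegs, hrev, show k - 1 + 1 = k by omega]
        · obtain ⟨c, rest, hcr⟩ := List.exists_cons_of_ne_nil hce
          rw [if_neg hce, hcuts, hcr, if_neg (by simp)]
          rw [sepSegs_snoc toks c rest k]
          rw [hlast2 c rest, show ((c :: rest) ++ [k]).headD 0 = c by simp]
          simp [hrev, show k - 1 + 1 = k by omega, List.append_assoc]
      · -- no cut at k: the token (if any) joins the current segment
        have hstep : sepStepB ids toks (segs, cur) k
            = (segs, cur ++ PySem.List.slice toks (some k) (some (k + 1))) := by
          simp [sepStepB, hp]
        rw [hstep, ih (k - 1) _ _ (by omega) (by omega)]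
        have hcuts : cutsUpto ids k = cutsUpto ids (k - 1) := by
          by_cases hk1 : 1 ≤ k
          · rw [cutsUpto_succ ids k hk1, if_neg (by
              intro hbeq
              exact hp ⟨by omega, beq_iff_eq.mp hbeq⟩)]
            simp
          · rw [cutsUpto_neg ids k (by omega), cutsUpto_neg ids (k - 1) (by omega)]
        rw [← hcuts]
        by_cases hce : cutsUpto ids k = []
        · rw [if_pos hce, if_pos hce]
          have hsp : PySem.List.slice toks (some 0) (some (k + 1))
              = PySem.List.slice toks (some 0) (some k)
                ++ PySem.List.slice toks (some k) (some (k + 1)) :=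
            slice_split toks 0 k (k + 1) (le_refl 0) hk0 (by omega)
          rw [hsp, List.reverse_append, slice_one_reverse toks k hk0,
            show k - 1 + 1 = k by omega]
          simp [List.append_assoc]
        · obtain ⟨c, rest, hcr⟩ := List.exists_cons_of_ne_nil hce
          rw [if_neg hce, if_neg hce]
          have hmem := mem_cutsUpto ids k ((cutsUpto ids k).getLastD 0)
            (by rw [hcr]; exact getLastD_mem c rest)
          have hsp : PySem.List.slice toks (some ((cutsUpto ids k).getLastD 0)) (some (k + 1))
              = PySem.List.slice toks (some ((cutsUpto ids k).getLastD 0)) (some k)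
                ++ PySem.List.slice toks (some k) (some (k + 1)) :=
            slice_split toks _ k (k + 1) (by omega) (by omega) (by omega)
          rw [hsp, List.reverse_append, slice_one_reverse toks k hk0,
            show k - 1 + 1 = k by omega]
          simp [List.append_assoc]

-- the forward-loop invariant for A (from index k with temp = ids[k-1], segment start idx)
theorem sepLoop_inv (ids : List Int) (toks : List String) (m : Nat) :
    ∀ (k idx : Int) (sep : List (List String)),
      ((ids.length : Int) - k).toNat = m → 1 ≤ k → k ≤ (ids.length : Int) - 1 →
      ((PySem.List.pyRange k (ids.length : Int) 1).foldl (sepStepA ids toks (ids.length : Int))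
          (sep, PySem.List.pyGetD ids (k - 1) 0, idx)).1
        = sep ++ sepSegs toks
            (idx :: (PySem.List.pyRange k (ids.length : Int) 1).filter
              (fun i => PySem.List.pyGetD ids i 0 == PySem.List.pyGetD ids (i - 1) 0)
              ++ [(ids.length : Int)]) := by
  induction m using Nat.strong_induction_on with
  | _ m ih =>
    intro k idx sep hm hk1 hkn
    set n : Int := (ids.length : Int) with hn
    have hkltn : k < n := by omega
    have hk0 : ¬ k = 0 := by omega
    rw [PySem.List.pyRange_one_cons hkltn]
    by_cases hcut : PySem.List.pyGetD ids (k - 1) 0 = PySem.List.pyGetD ids k 0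
    case pos =>
      have hc : (PySem.List.pyGetD ids k 0 == PySem.List.pyGetD ids (k - 1) 0) = true :=
        beq_iff_eq.mpr hcut.symm
      by_cases hlast : k = n - 1
      · have hemp : PySem.List.pyRange (k + 1) n 1 = [] :=
          PySem.List.pyRange_one_eq_nil (by omega)
        have step : sepStepA ids toks n (sep, PySem.List.pyGetD ids (k - 1) 0, idx) k
            = (sep ++ [PySem.List.slice toks (some idx) (some k)]
                ++ [PySem.List.slice toks (some k) (some n)], PySem.List.pyGetD ids k 0, k) := by
          simp [sepStepA, hk0, hcut, if_pos hlast]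
        rw [hemp, List.foldl_cons, List.foldl_nil, step]
        simp [hc, sepSegs, List.append_assoc]
      · have step : sepStepA ids toks n (sep, PySem.List.pyGetD ids (k - 1) 0, idx) k
            = (sep ++ [PySem.List.slice toks (some idx) (some k)],
               PySem.List.pyGetD ids k 0, k) := by
          simp [sepStepA, hk0, hlast, hcut]
        rw [List.foldl_cons, step]
        have hm' : (n - (k + 1)).toNat < m := by omega
        have hrec := ih _ hm' (k + 1) k (sep ++ [PySem.List.slice toks (some idx) (some k)])
          rfl (by omega) (by omega)
        rw [show k + 1 - 1 = k by omega] at hrec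
        rw [hrec]
        simp only [List.filter_cons, if_pos hc, List.cons_append, sepSegs_cons,
          List.append_assoc]
        simp
    case neg =>
      have hc : (PySem.List.pyGetD ids k 0 == PySem.List.pyGetD ids (k - 1) 0) = false :=
        beq_eq_false_iff_ne.mpr (fun h => hcut h.symm)
      by_cases hlast : k = n - 1
      · have hemp : PySem.List.pyRange (k + 1) n 1 = [] :=
          PySem.List.pyRange_one_eq_nil (by omega)
        have step : sepStepA ids toks n (sep, PySem.List.pyGetD ids (k - 1) 0, idx) k
            = (sep ++ [PySem.List.slice toks (some idx) (some n)],
               PySem.List.pyGetD ids k 0, idx) := by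
          simp [sepStepA, hk0, hcut, if_pos hlast]
        rw [hemp, List.foldl_cons, List.foldl_nil, step]
        simp [hc, sepSegs]
      · have step : sepStepA ids toks n (sep, PySem.List.pyGetD ids (k - 1) 0, idx) k
            = (sep, PySem.List.pyGetD ids k 0, idx) := by
          simp [sepStepA, hk0, hlast, hcut]
        rw [List.foldl_cons, step]
        have hm' : (n - (k + 1)).toNat < m := by omega
        have hrec := ih _ hm' (k + 1) idx sep rfl (by omega) (by omega)
        rw [show k + 1 - 1 = k by omega] at hrec
        rw [hrec, List.filter_cons, if_neg (by simp [hc])]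

-- A's result in the normal form: slices between 0, the cuts, and n
theorem separate_conv_eq_segs (ids : List Int) (toks : List String) (hnil : ids ≠ []) :
    separate_conv ids toks
      = sepSegs toks (0 :: cutsUpto ids ((ids.length : Int) - 1) ++ [(ids.length : Int)]) := by
  unfold separate_conv
  have hlen : 1 ≤ (ids.length : Int) := by
    have := List.length_pos_iff.mpr hnil
    omega
  set n : Int := (ids.length : Int) with hn
  have hcu : cutsUpto ids (n - 1)
      = (PySem.List.pyRange 1 n 1).filter
          (fun i => PySem.List.pyGetD ids i 0 == PySem.List.pyGetD ids (i - 1) 0) := by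
    unfold cutsUpto
    rw [show n - 1 + 1 = n by omega]
  rw [PySem.List.pyRange_one_cons (show (0:Int) < n by omega), List.foldl_cons]
  by_cases h1 : n = 1
  · have hemp : PySem.List.pyRange 1 n 1 = [] := PySem.List.pyRange_one_eq_nil (by omega)
    have hc0 : cutsUpto ids 0 = [] := cutsUpto_neg ids 0 (le_refl 0)
    simp [sepStepA, sepSegs, h1, hc0]
  · have step0 : sepStepA ids toks n ([], 0, 0) 0
        = ([], PySem.List.pyGetD ids 0 0, 0) := by
      simp [sepStepA, show ¬ (0 : Int) = n - 1 by omega]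
    rw [step0, hcu]
    have := sepLoop_inv ids toks (n - 1).toNat 1 0 [] (by omega) (by omega) (by omega)
    simpa using this

-- B's result in the same normal form
theorem separate_conv_alt_eq_segs (ids : List Int) (toks : List String) (hnil : ids ≠ []) :
    separate_conv_alt ids toks
      = sepSegs toks (0 :: cutsUpto ids ((ids.length : Int) - 1) ++ [(ids.length : Int)]) := by
  unfold separate_conv_alt
  rw [if_neg hnil]
  have hlen : 1 ≤ (ids.length : Int) := by
    have := List.length_pos_iff.mpr hnil
    omega
  set n : Int := (ids.length : Int) with hn
  have hinv := sepLoopB_inv ids toks (n - 1 + 1).toNat (n - 1) [] [] rfl (by omega)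
  rw [show n - 1 + 1 = n by omega] at hinv
  by_cases hce : cutsUpto ids (n - 1) = []
  · rw [if_pos hce] at hinv
    rw [hinv, hce]
    simp [sepSegs]
  · obtain ⟨c, rest, hcr⟩ := List.exists_cons_of_ne_nil hce
    rw [if_neg hce] at hinv
    rw [hinv, hcr]
    rw [show (0 :: (c :: rest) ++ [n]) = 0 :: c :: (rest ++ [n]) by simp,
      sepSegs_cons toks 0 c (rest ++ [n]),
      show (c :: (rest ++ [n])) = (c :: rest) ++ [n] by simp,
      sepSegs_snoc toks c rest n]
    simp

-- ===== VERDICT (by name: the statement is the Claim_ definition above) =====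
theorem separate_conv_spec : Claim_equal_separate_conv := by
  intro ids toks _
  unfold Spec_separate_conv
  by_cases hnil : ids = []
  · subst hnil
    simp [separate_conv, separate_conv_alt, PySem.List.pyRange_one_eq_nil]
  · rw [separate_conv_eq_segs ids toks hnil, separate_conv_alt_eq_segs ids toks hnil]
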